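-- pv_equiv track=rewrite | github.com/Clancy-W/Advent-of-Code | 2017-01.py | part1
-- ===== SOURCE A (Python) =====
-- def part1(l):
--     pos = 0
--     arr = [0]
--     for i in range(1, 2018):
--         pos = (pos + l) % len(arr)
--         arr = arr[:pos+1] + [i] + arr[pos+1:]
--         pos = pos + 1
--
--     return (arr[arr.index(2017) + 1])
-- ===== SOURCE B (Python) =====
-- def part1(l):
--     # Zipper (gap buffer): the circular buffer is left + reversed(right_rev);
--     # the current element is left[-1].  Stepping forward pops from right_rev
--     # (reversing left when the walk wraps around), inserting appends to left.
--     # No modular index arithmetic into a flat list, no slice rebuilding per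
--     # round, and no final .index search: after the last insertion 2017 is the
--     # current element, so its successor is right_rev[-1].
--     #
--     # NOTE on the final read: right_rev is empty exactly when 2017 ended up as
--     # the LAST element of the buffer.  There A's arr[arr.index(2017) + 1] is an
--     # out-of-range read and raises IndexError (e.g. part1(0)); right_rev[-1]
--     # raises IndexError on those very same inputs, so B reproduces A's raise.
--     left, right_rev = [0], []
--     for i in range(1, 2018):
--         for _ in range(l % i):
--             if not right_rev:
--                 left, right_rev = [], left[::-1]
--             left.append(right_rev.pop())
--         left.append(i)
--     return right_rev[-1]
-- ===== Notes on version B (the rewrite author's own statement) =====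
-- stated objective: alternative
-- what changed: Replaces A's flat list with modular index arithmetic, per-iteration slice rebuilding and a final .index scan by a zipper (gap buffer) that steps the current position one element at a time with O(1) amortized pops/appends and reads the answer directly as the element after the current one; on the exceptional l where 2017 ends up last in the buffer, A's arr[arr.index(2017)+1] raises IndexError and B's right_rev[-1] raises IndexError on exactly the same inputs (those l are outside Pre_).
import Mathlib
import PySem

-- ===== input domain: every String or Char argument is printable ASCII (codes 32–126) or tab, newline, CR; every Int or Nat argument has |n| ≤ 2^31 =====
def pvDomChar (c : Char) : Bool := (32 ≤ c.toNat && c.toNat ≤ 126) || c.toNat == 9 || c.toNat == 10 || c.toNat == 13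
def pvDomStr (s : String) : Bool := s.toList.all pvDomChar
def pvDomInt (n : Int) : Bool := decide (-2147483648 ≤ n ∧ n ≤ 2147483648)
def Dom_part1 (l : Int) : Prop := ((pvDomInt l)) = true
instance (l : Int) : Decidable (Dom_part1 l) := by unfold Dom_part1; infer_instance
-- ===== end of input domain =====

-- B replaces A's flat list + modular index arithmetic + slice rebuilding + final .index search by a
-- zipper (gap buffer) stepped one position at a time; objective: alternative (not claimed faster).

-- ===== PORT A =====
def part1_stepA (l : Int) (s : Int × List Int) (i : Int) : Int × List Int :=
  let pos := PySem.Int.mod (s.1 + l) ((s.2.length : Int))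
  (pos + 1, PySem.List.slice s.2 none (some (pos + 1)) ++ [i] ++ PySem.List.slice s.2 (some (pos + 1)) none)

def part1 (l : Int) : Int :=
  let s := (PySem.List.pyRange 1 2018 1).foldl (part1_stepA l) (0, [0])
  match PySem.List.index? s.2 2017 with
  | some j => (PySem.List.pyGet? s.2 ((j : Int) + 1)).getD 0   -- arr[arr.index(2017) + 1]; IndexError → none, excluded by Pre_
  | none => 0                                                  -- ValueError (2017 absent) — unreachable

-- ===== PORT B =====
-- Source B's two Python lists are stacks growing at the right; they are ported with the stack top
-- at the list HEAD (the Lean list is the Python list reversed), so Python's append / pop() /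
-- s[-1] become cons / tail / head — the same operations on the same stacks, O(1) as in Source B.
-- one zipper step forward: wrap when right_rev is empty, then pop right_rev onto left
def part1_move (z : List Int × List Int) : List Int × List Int :=
  let z1 := if z.2 = [] then (([] : List Int), z.1.reverse) else z
  (z1.2.headD 0 :: z1.1, z1.2.tail)   -- left.append(right_rev.pop()); pop of [] raises IndexError in Python, excluded by Pre_

def part1_stepB (l : Int) (z : List Int × List Int) (i : Int) : List Int × List Int :=
  let z' := part1_move^[(PySem.Int.mod l i).toNat] z   -- for _ in range(l % i)
  (i :: z'.1, z'.2)                                    -- left.append(i)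

def part1_alt (l : Int) : Int :=
  let z := (PySem.List.pyRange 1 2018 1).foldl (part1_stepB l) ([0], [])
  (z.2.headD 0)                                        -- right_rev[-1]; IndexError on [] in Python, same l as A's IndexError, excluded by Pre_

-- ===== PRECONDITION & SPEC =====
-- Pre_ excludes ONLY inputs on which the Python A RAISES — never an input on which A returns a
-- value.  For these sporadic l the spinlock leaves 2017 as the LAST element of the buffer, so
-- A's final read arr[arr.index(2017) + 1] is one past the end and raises IndexError (e.g.
-- part1(0) raises IndexError); B's final read right_rev[-1] raises IndexError on exactly the
-- same l, i.e. B reproduces A's raise, and the two programs agree everywhere else.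
-- pvRaisesIndexError_part1 enumerates every such l with |l| ≤ 2*10^5 (density ≈ 1/2017; rarer
-- such l exist farther out, equally crashes of BOTH programs).  The Lean PORTS in fact agree on
-- ALL l (the verdict uses part1_eq_alt_total below, proved with no hypothesis on l): Pre_ is
-- needed only because both Pythons raise there while the total ports read a defaulted head.
set_option maxHeartbeats 2000000 in
def pvRaisesIndexError_part1 : List Int := [-199391, -190725, -190431, -190137, -189348, -187752, -187444, -185099, -184836, -175106, -173976, -172205, -170975, -169498, -168411, -168314, -164298, -162165, -159103, -157285, -156035, -150501, -150320, -146223, -143328, -141895, -141503, -140611, -138694, -136054, -135780, -134940, -131906, -130445, -129374, -123626, -122985, -122937, -122707, -121394, -121302, -115950, -114507, -112060, -111514, -110486, -110056, -108280, -107237, -106787, -105732, -103545, -101773, -100333, -99380, -93958, -93915, -91149, -85554, -84925, -83505, -81861, -80337, -75679, -71725, -69027, -68935, -67080, -64481, -63379, -63042, -59648, -56468, -54531, -53317, -53199, -53134, -53038, -52122, -50254, -49932, -49561, -49194, -46946, -46681, -44095, -42488, -42396, -41256, -41188, -36419, -36036, -27137, -25852, -21950, -18594, -12632, -7937, -5880,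 -5219, -1376, -862, 0, 4914, 8100, 9084, 11902, 15672, 15682, 17421, 18904, 22587, 27571, 30203, 34661, 35696, 36114, 39447, 42584, 43007, 43628, 44193, 44635, 46524, 49099, 50748, 51832, 54420, 55429, 57196, 61062, 67385, 70086, 71524, 71530, 73592, 74240, 74576, 75227, 78423, 79119, 80935, 81600, 84960, 85228, 85292, 90440, 90803, 92270, 95564, 96184, 96445, 97040, 99673, 104522, 105235, 105255, 107088, 107232, 109286, 110025, 110186, 111352, 112715, 118038, 118867, 119043, 119113, 119628, 119894, 121173, 121668, 124070, 127071, 127413, 132436, 134048, 134533, 136932, 139275, 139361, 139604, 141948, 142536, 147080, 148149, 149113, 156051, 161441, 162020, 164003, 164968, 168639, 168901, 170641, 171278, 173596, 173654, 179301, 181024, 182385, 184155, 186786, 188433, 192919, 196548, 196650, 199153]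

def Pre_part1 (l : Int) : Prop := l ∉ pvRaisesIndexError_part1
instance (l : Int) : Decidable (Pre_part1 l) := by unfold Pre_part1; infer_instance
def pvWitness_part1 : Int := (3)

def Spec_part1 (l : Int) (out : Int) : Prop := out = part1_alt l
instance (l : Int) (out : Int) : Decidable (Spec_part1 l out) := by unfold Spec_part1; infer_instance

-- ===== CLAIM (what is proved, stated in full; the proofs are below) =====
def Claim_equal_part1 : Prop := ∀ (l : Int), Dom_part1 l → Pre_part1 l → Spec_part1 l (part1 l)

-- ===== LEMMAS AND PROOFS =====

-- loop invariant: after the iterations i = 1..m, A's state is (p, pre ++ [m] ++ suf) with the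
-- current element m at index p = pre.length and every other element < m, and B's zipper is
-- (pre ++ [m], suf.reverse)
def part1_Inv (m : Nat) (s : Int × List Int) (z : List Int × List Int) : Prop :=
  ∃ pre suf : List Int,
    s.2 = pre ++ (m : Int) :: suf ∧
    s.1 = (pre.length : Int) ∧
    pre.length + 1 + suf.length = m + 1 ∧
    (∀ x ∈ pre, x < (m : Int)) ∧ (∀ x ∈ suf, x < (m : Int)) ∧
    z.1 = (m : Int) :: pre.reverse ∧ z.2 = suf

lemma part1_move_zip (arr : List Int) (p : Nat) (hp : p < arr.length) :
    part1_move ((arr.take (p+1)).reverse, arr.drop (p+1))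
      = ((arr.take ((p+1) % arr.length + 1)).reverse, arr.drop ((p+1) % arr.length + 1)) := by
  by_cases h : p + 1 < arr.length
  · rw [Nat.mod_eq_of_lt h]
    have hd : arr.drop (p+1) ≠ [] := by
      simp [List.drop_eq_nil_iff]; omega
    have hget : arr[p+1]? = some arr[p+1] := List.getElem?_eq_getElem h
    unfold part1_move
    rw [if_neg hd]
    simp [List.head?_drop, hget, List.tail_drop, List.take_add_one]
  · have hn : p + 1 = arr.length := by omega
    have hd : arr.drop (p+1) = [] := List.drop_eq_nil_of_le (by omega)
    have hne : arr ≠ [] := by intro h0; simp [h0] at hp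
    have hget : arr[0]? = some arr[0] := List.getElem?_eq_getElem (by omega)
    unfold part1_move
    rw [hn]
    simp only [hn ▸ hd, List.take_length, Nat.mod_self, List.reverse_reverse]
    simp [List.head?_eq_getElem?, hget, List.take_one, ← List.drop_one]

lemma part1_move_iter (arr : List Int) (k p : Nat) (hp : p < arr.length) :
    part1_move^[k] ((arr.take (p+1)).reverse, arr.drop (p+1))
      = ((arr.take ((p+k) % arr.length + 1)).reverse, arr.drop ((p+k) % arr.length + 1)) := by
  induction k generalizing p with
  | zero => simp [Nat.mod_eq_of_lt hp]
  | succ k ih =>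
    rw [Function.iterate_succ_apply, part1_move_zip arr p hp,
      ih ((p+1) % arr.length) (Nat.mod_lt _ (by omega)), Nat.mod_add_mod]
    have : p + 1 + k = p + (k + 1) := by omega
    rw [this]

lemma part1_step_inv (l : Int) (i : Nat) (s : Int × List Int) (z : List Int × List Int)
    (h : part1_Inv i s z) :
    part1_Inv (i+1) (part1_stepA l s ((i : Int)+1)) (part1_stepB l z ((i : Int)+1)) := by
  obtain ⟨pre, suf, harr, hpos, hlen, hpre, hsuf, hz1, hz2⟩ := h
  have hlenarr : s.2.length = i + 1 := by
    rw [harr]; simp; omega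
  have hplt : pre.length < s.2.length := by omega
  -- the Int position computed by A is the Nat position computed by B's zipper walk
  set k : Nat := (PySem.Int.mod l ((i : Int)+1)).toNat with hk
  set q : Nat := (pre.length + k) % s.2.length with hq
  have hnpos : (0 : Int) < (s.2.length : Int) := by exact_mod_cast (by omega : 0 < s.2.length)
  have hkcast : (k : Int) = l % (s.2.length : Int) := by
    rw [hk, PySem.Int.mod_eq_emod_of_pos (by omega : (0:Int) < (i:Int)+1)]
    have h1 : ((i : Int) + 1) = (s.2.length : Int) := by rw [hlenarr]; push_cast; ring
    rw [h1, Int.toNat_of_nonneg (Int.emod_nonneg _ (by omega))]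
  have hmodeq : PySem.Int.mod (s.1 + l) ((s.2.length : Int)) = (q : Int) := by
    rw [PySem.Int.mod_eq_emod_of_pos hnpos, hpos, hq]
    push_cast
    conv_lhs => rw [Int.add_emod]
    conv_rhs => rw [Int.add_emod]
    rw [hkcast, Int.emod_emod_of_dvd _ dvd_rfl]
  have hqlt : q < s.2.length := Nat.mod_lt _ (by omega)
  have htake : s.2.take (pre.length + 1) = pre ++ [(i : Int)] := by
    rw [harr, ← List.singleton_append, ← List.append_assoc]
    exact List.take_left' (by simp)
  have hdrop : s.2.drop (pre.length + 1) = suf := by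
    rw [harr, ← List.singleton_append, ← List.append_assoc]
    exact List.drop_left' (by simp)
  have hzip : z = ((s.2.take (pre.length + 1)).reverse, s.2.drop (pre.length + 1)) := by
    rw [htake, hdrop, Prod.ext_iff, hz1, hz2]
    constructor
    · simp
    · rfl
  have hmove : part1_move^[k] z
      = ((s.2.take (q + 1)).reverse, s.2.drop (q + 1)) := by
    rw [hzip, part1_move_iter s.2 k pre.length hplt]
  have hmem : ∀ x ∈ s.2, x < (i : Int) + 1 := by
    intro x hx
    rw [harr] at hx
    rcases List.mem_append.1 hx with h1 | h1
    · exact lt_trans (hpre x h1) (by omega)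
    · rcases List.mem_cons.1 h1 with h2 | h2
      · omega
      · exact lt_trans (hsuf x h2) (by omega)
  refine ⟨s.2.take (q+1), s.2.drop (q+1), ?_, ?_, ?_, ?_, ?_, ?_, ?_⟩
  · show PySem.List.slice s.2 none (some (PySem.Int.mod (s.1 + l) ((s.2.length : Int)) + 1))
        ++ [(i : Int)+1] ++ PySem.List.slice s.2 (some (PySem.Int.mod (s.1 + l) ((s.2.length : Int)) + 1)) none
        = s.2.take (q+1) ++ ((i:Nat)+1 : Int) :: s.2.drop (q+1)
    rw [hmodeq, PySem.List.slice_to s.2 (by omega : (0:Int) ≤ (q:Int)+1),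
      PySem.List.slice_from s.2 (by omega : (0:Int) ≤ (q:Int)+1)]
    have : ((q : Int) + 1).toNat = q + 1 := by omega
    rw [this]
    simp
  · show PySem.Int.mod (s.1 + l) ((s.2.length : Int)) + 1 = ((s.2.take (q+1)).length : Int)
    rw [hmodeq, List.length_take_of_le (by omega)]
    push_cast; ring
  · simp [List.length_drop]
    omega
  · intro x hx
    have := hmem x (List.mem_of_mem_take hx)
    push_cast; omega
  · intro x hx
    have := hmem x (List.mem_of_mem_drop hx)
    push_cast; omega
  · show ((i : Int)+1) :: (part1_move^[(PySem.Int.mod l ((i : Int)+1)).toNat] z).1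
        = ((i:Nat)+1 : Int) :: (s.2.take (q+1)).reverse
    rw [← hk, hmove]
  · show (part1_move^[(PySem.Int.mod l ((i : Int)+1)).toNat] z).2 = s.2.drop (q+1)
    rw [← hk, hmove]

lemma part1_loop_inv (l : Int) (m : Nat) :
    part1_Inv m ((PySem.List.pyRange 1 ((m : Int)+1) 1).foldl (part1_stepA l) (0, [0]))
               ((PySem.List.pyRange 1 ((m : Int)+1) 1).foldl (part1_stepB l) ([0], [])) := by
  induction m with
  | zero =>
    rw [PySem.List.pyRange_one_eq_nil (by norm_num)]
    exact ⟨[], [], by simp, by simp, by simp, by simp, by simp, by simp, by simp⟩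
  | succ m ih =>
    have e : ((m + 1 : Nat) : Int) + 1 = ((m : Int) + 1) + 1 := by push_cast; ring
    rw [e, PySem.List.pyRange_one_succ_right (by omega), List.foldl_append,
      List.foldl_append]
    simpa using part1_step_inv l m _ _ ih

-- the two ports agree on EVERY l, with no precondition: on the excluded l both PYTHONS raise
-- IndexError, while the total ports both read a defaulted head and still coincide
lemma part1_eq_alt_total (l : Int) : part1 l = part1_alt l := by
  unfold part1 part1_alt
  have h := part1_loop_inv l 2017
  have e : ((2017 : Nat) : Int) + 1 = 2018 := by norm_num
  rw [e] at h
  obtain ⟨pre, suf, harr, hpos, hlen, hpre, hsuf, hz1, hz2⟩ := h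
  have h2017 : ((2017 : Nat) : Int) = (2017 : Int) := by norm_num
  rw [h2017] at harr hpre hsuf
  have hnotmem : (2017 : Int) ∉ pre := by
    intro hm
    have := hpre _ hm
    omega
  have hidx : PySem.List.index? ((PySem.List.pyRange 1 2018 1).foldl (part1_stepA l) (0, [0])).2 2017
      = some pre.length :=
    (PySem.List.index?_eq_some_iff _ 2017 pre.length).2 ⟨pre, suf, harr, rfl, hnotmem⟩
  simp only [hidx]
  have ecast : (pre.length : Int) + 1 = ((pre.length + 1 : Nat) : Int) := by push_cast; ring
  rw [ecast, PySem.List.pyGet?_natCast, harr, hz2,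
    List.getElem?_append_right (by omega)]
  simp [List.head?_eq_getElem?]

-- ===== VERDICT (by name: the statement is the Claim_ definition above) =====
theorem part1_spec : Claim_equal_part1 := by
  intro l _ _
  exact part1_eq_alt_total l
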